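-- pv_equiv track=rewrite | github.com/alexandros-antonorsi/high-school-code | Python/moreparity.py | addsum
-- ===== SOURCE A (Python) =====
-- def addsum(pos, num):#calculates the sum for each parity value
--     total = 0
--     start = pos-1
--     for x in range(1, pos+1):
--         for y in range(start, len(num), pos*2):
--             total += num[y]
--         start += 1
--     return total
-- ===== SOURCE B (Python) =====
-- def addsum(pos, num):  # calculates the sum for each parity value
--     # Single flat pass: A's nested strided loops hit exactly the indices i
--     # with pos-1 <= i % (2*pos) <= 2*pos-2, each once.
--     if pos <= 0:
--         return 0
--     total = 0
--     window = 2 * pos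
--     for i, v in enumerate(num):
--         r = i % window
--         if pos - 1 <= r <= window - 2:
--             total += v
--     return total
-- ===== Notes on version B (the rewrite author's own statement) =====
-- stated objective: alternative
-- what changed: Replaced A's pos nested strided passes (a shifting start index plus an inner stride-2*pos loop) with a single flat enumerate pass that tests each index's residue modulo 2*pos against the window [pos-1, 2*pos-2], keeping only a running total.
import Mathlib
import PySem

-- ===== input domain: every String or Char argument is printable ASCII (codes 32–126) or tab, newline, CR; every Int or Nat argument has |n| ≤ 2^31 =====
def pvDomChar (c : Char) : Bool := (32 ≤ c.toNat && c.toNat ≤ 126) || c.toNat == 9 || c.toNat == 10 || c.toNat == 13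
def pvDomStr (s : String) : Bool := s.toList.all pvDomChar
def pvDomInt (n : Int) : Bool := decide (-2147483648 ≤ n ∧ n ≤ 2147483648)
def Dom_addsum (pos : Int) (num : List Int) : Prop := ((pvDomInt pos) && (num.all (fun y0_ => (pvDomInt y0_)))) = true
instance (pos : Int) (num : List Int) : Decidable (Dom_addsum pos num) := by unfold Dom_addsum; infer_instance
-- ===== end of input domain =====

-- B replaces A's pos nested strided passes by one flat pass testing each index's residue
-- modulo 2*pos against the window [pos-1, 2*pos-2] (alternative decomposition, same cost).


-- ===== PORT A =====
def addsum (pos : Int) (num : List Int) : Int :=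
  ((PySem.List.pyRange 1 (pos + 1) 1).foldl
    (fun (st : Int × Int) (_x : Int) =>
      ((PySem.List.pyRange st.2 (PySem.List.len num) (pos * 2)).foldl
        (fun total y => total + PySem.List.pyGetD num y 0) st.1,
       st.2 + 1))
    (0, pos - 1)).1

-- ===== PORT B =====
def addsum_alt (pos : Int) (num : List Int) : Int :=
  if pos ≤ 0 then 0
  else
    (PySem.List.enumerate num).foldl
      (fun total iv =>
        let r := PySem.Int.mod iv.1 (2 * pos)
        if pos - 1 ≤ r ∧ r ≤ 2 * pos - 2 then total + iv.2 else total)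
      0

-- ===== PRECONDITION & SPEC =====
def Spec_addsum (pos : Int) (num : List Int) (out : Int) : Prop := out = addsum_alt pos num
instance (pos : Int) (num : List Int) (out : Int) : Decidable (Spec_addsum pos num out) := by unfold Spec_addsum; infer_instance

-- ===== CLAIM (what is proved, stated in full; the proofs are below) =====
def Claim_equal_addsum : Prop := ∀ (pos : Int) (num : List Int), Dom_addsum pos num → Spec_addsum pos num (addsum pos num)

-- ===== LEMMAS AND PROOFS =====

-- Sum over a filtered list as a sum of guarded terms over the whole list.
lemma filter_map_sum (l : List Int) (p : Int → Bool) (g : Int → Int) :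
    ((l.filter p).map g).sum = (l.map (fun x => if p x then g x else 0)).sum := by
  induction l with
  | nil => simp
  | cons a l ih => by_cases h : p a <;> simp [h, ih]

-- A positive-stride range is the unit-stride range filtered by divisibility of the offset.
lemma strided_eq_filter (a b d : Int) (hd : 0 < d) :
    PySem.List.pyRange a b d = (PySem.List.pyRange a b 1).filter (fun x => decide (d ∣ (x - a))) := by
  have hs1 : (PySem.List.pyRange a b d).Pairwise (· < ·) := by
    rw [PySem.List.pyRange_of_pos a b hd]
    refine List.pairwise_map.mpr (List.Pairwise.imp ?_ List.pairwise_lt_range)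
    intro k k' hk
    have hk' : (k : Int) < (k' : Int) := by exact_mod_cast hk
    nlinarith
  have hs2 : ((PySem.List.pyRange a b 1).filter (fun x => decide (d ∣ (x - a)))).Pairwise (· < ·) :=
    List.Pairwise.filter _ (PySem.List.pairwise_lt_pyRange_one a b)
  have hperm : (PySem.List.pyRange a b d).Perm
      ((PySem.List.pyRange a b 1).filter (fun x => decide (d ∣ (x - a)))) := by
    refine (List.perm_ext_iff_of_nodup (hs1.nodup) (hs2.nodup)).mpr ?_
    intro x
    rw [PySem.List.mem_pyRange_iff_of_pos hd, List.mem_filter, PySem.List.mem_pyRange_one]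
    simp only [decide_eq_true_eq]
    tauto
  exact List.eq_of_perm_of_sorted
    (fun x y _ _ h1 h2 => absurd h1 (not_lt.mpr h2.le)) hs1 hs2 hperm

-- A's outer loop: fold with state (total, start), start stepping by one.
lemma outer_fold {α : Type} (l : List α) (row : Int → Int) (t s : Int) :
    (l.foldl (fun (st : Int × Int) (_ : α) => (st.1 + row st.2, st.2 + 1)) (t, s)).1
      = t + ((List.range l.length).map (fun (k : Nat) => row (s + (k : Int)))).sum := by
  induction l generalizing t s with
  | nil => simp
  | cons a l ih =>
    rw [List.foldl_cons, ih, List.length_cons, List.range_succ_eq_map, List.map_cons,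
      List.map_map, List.sum_cons]
    have h2 : (List.range l.length).map ((fun (k : Nat) => row (s + (k : Int))) ∘ Nat.succ)
        = (List.range l.length).map (fun (k : Nat) => row (s + 1 + (k : Int))) := by
      refine List.map_congr_left (fun k _ => ?_)
      simp only [Function.comp_apply]
      congr 1
      push_cast
      ring
    rw [h2]
    simp only [Prod.fst, Prod.snd]
    push_cast
    ring

lemma sum_list_range (n : Nat) (f : Nat → Int) :
    ((List.range n).map f).sum = ∑ k ∈ Finset.range n, f k := by
  induction n with
  | zero => simp
  | succ n ih =>
    rw [List.range_succ, Finset.sum_range_succ, List.map_append, List.sum_append, ih]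
    simp

-- A single row (start s, stride d) as a guarded sum over all indices.
lemma row_full (num : List Int) (s d : Int) (hs : 0 ≤ s) (hd : 0 < d) :
    ((PySem.List.pyRange s (PySem.List.len num) d).map (fun y => PySem.List.pyGetD num y 0)).sum
      = ((PySem.List.pyRange 0 (PySem.List.len num) 1).map
          (fun j => if s ≤ j ∧ d ∣ (j - s) then PySem.List.pyGetD num j 0 else 0)).sum := by
  rw [strided_eq_filter s (PySem.List.len num) d hd, filter_map_sum]
  by_cases h : s ≤ PySem.List.len num
  · rw [PySem.List.pyRange_one_append 0 s (PySem.List.len num) hs h, List.map_append,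
      List.sum_append]
    have h1 : ((PySem.List.pyRange 0 s 1).map
        (fun j => if s ≤ j ∧ d ∣ (j - s) then PySem.List.pyGetD num j 0 else 0)).sum = 0 := by
      refine List.sum_eq_zero (fun x hx => ?_)
      obtain ⟨j, hj, rfl⟩ := List.mem_map.mp hx
      have hb := PySem.List.mem_pyRange_one.mp hj
      rw [if_neg (by push_neg; intro hsj; omega)]
    rw [h1, zero_add]
    refine congrArg List.sum (List.map_congr_left (fun x hx => ?_))
    have hb := PySem.List.mem_pyRange_one.mp hx
    by_cases hdvd : d ∣ x - s <;> simp [hdvd, hb.1]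
  · push_neg at h
    rw [PySem.List.pyRange_one_eq_nil (le_of_lt h)]
    symm
    simp only [List.map_nil, List.sum_nil]
    refine List.sum_eq_zero (fun x hx => ?_)
    obtain ⟨j, hj, rfl⟩ := List.mem_map.mp hx
    have hb := PySem.List.mem_pyRange_one.mp hj
    rw [if_neg (by push_neg; intro hsj; omega)]

-- B's fold: conditional accumulation as a guarded sum.
lemma foldl_if_add {γ : Type} (l : List γ) (p : γ → Prop) [DecidablePred p] (g : γ → Int)
    (a : Int) :
    l.foldl (fun t x => if p x then t + g x else t) a
      = a + (l.map (fun x => if p x then g x else 0)).sum := by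
  induction l generalizing a with
  | nil => simp
  | cons b l ih =>
    by_cases h : p b <;> simp [h, ih] <;> ring

-- For 0 ≤ j, exactly one start s = pos-1+k (0 ≤ k < pos) reaches index j, namely s = j % (2*pos);
-- so the column sum over k collapses to the residue-window test.
lemma key_column (pos j G : Int) (hp : 0 < pos) (hj : 0 ≤ j) :
    (∑ k ∈ Finset.range pos.toNat,
      if pos - 1 + (k : Int) ≤ j ∧ (pos * 2) ∣ (j - (pos - 1 + (k : Int))) then G else 0)
    = if pos - 1 ≤ PySem.Int.mod j (2 * pos) ∧ PySem.Int.mod j (2 * pos) ≤ 2 * pos - 2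
      then G else 0 := by
  have hm2 : (0:Int) < 2 * pos := by omega
  rw [PySem.Int.mod_eq_emod_of_pos hm2]
  have hr0 : 0 ≤ j % (2 * pos) := Int.emod_nonneg j (by omega)
  have hrm : j % (2 * pos) < 2 * pos := Int.emod_lt_of_pos j hm2
  have hq : 2 * pos * (j / (2 * pos)) + j % (2 * pos) = j := Int.ediv_add_emod j (2 * pos)
  have hq0 : 0 ≤ j / (2 * pos) := Int.ediv_nonneg hj (by omega)
  have hrj : j % (2 * pos) ≤ j := by nlinarith
  have hiff : ∀ k ∈ Finset.range pos.toNat,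
      (pos - 1 + (k : Int) ≤ j ∧ (pos * 2) ∣ (j - (pos - 1 + (k : Int))))
        ↔ ((k : Int) = j % (2 * pos) - (pos - 1)) := by
    intro k hk
    have hk' : (k : Int) < pos := by
      have := Finset.mem_range.mp hk
      omega
    have hmul : pos * 2 = 2 * pos := by ring
    rw [hmul]
    constructor
    · rintro ⟨hle, hdvd⟩
      have h0 : (j - (pos - 1 + (k : Int))) % (2 * pos) = 0 := by
        rcases hdvd with ⟨c, hc⟩
        rw [hc]
        exact Int.mul_emod_right _ _
      have hjm : j % (2 * pos) = (pos - 1 + (k : Int)) % (2 * pos) :=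
        Int.emod_eq_emod_iff_emod_sub_eq_zero.mpr h0
      rw [show (pos - 1 + (k : Int)) % (2 * pos) = pos - 1 + (k : Int) from
        Int.emod_eq_of_lt (by omega) (by omega)] at hjm
      omega
    · intro hkeq
      refine ⟨by omega, ⟨j / (2 * pos), by omega⟩⟩
  rw [Finset.sum_congr rfl (fun k hk => if_congr (hiff k hk) rfl rfl)]
  by_cases hc : pos - 1 ≤ j % (2 * pos) ∧ j % (2 * pos) ≤ 2 * pos - 2
  · rw [if_pos hc]
    refine Finset.sum_eq_single_of_mem (j % (2 * pos) - (pos - 1)).toNat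
      (Finset.mem_range.mpr (by omega)) (fun k hk hne => if_neg (fun hkeq => hne (by omega)))
      |>.trans (if_pos (by omega))
  · rw [if_neg hc]
    refine Finset.sum_eq_zero (fun k hk => if_neg (fun hkeq => ?_))
    have hk' := Finset.mem_range.mp hk
    omega

-- ===== VERDICT (by name: the statement is the Claim_ definition above) =====
theorem addsum_spec : Claim_equal_addsum := by
  intro pos num _
  unfold Spec_addsum
  by_cases hp : pos ≤ 0
  · have hnil : PySem.List.pyRange 1 (pos + 1) 1 = [] := PySem.List.pyRange_one_eq_nil (by omega)
    simp [addsum, addsum_alt, hnil, hp]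
  · push_neg at hp
    have hp0 : ¬ pos ≤ 0 := not_le.mpr hp
    have hd : (0:Int) < pos * 2 := by omega
    -- A as a double guarded sum
    have hA : addsum pos num = ∑ k ∈ Finset.range pos.toNat, ∑ j ∈ Finset.range num.length,
        (if pos - 1 + (k : Int) ≤ (j : Int) ∧ (pos * 2) ∣ ((j : Int) - (pos - 1 + (k : Int)))
         then PySem.List.pyGetD num (j : Int) 0 else 0) := by
      unfold addsum
      simp only [PySem.List.foldl_add]
      rw [outer_fold (PySem.List.pyRange 1 (pos + 1) 1)
        (fun s => ((PySem.List.pyRange s (PySem.List.len num) (pos * 2)).map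
          (fun y => PySem.List.pyGetD num y 0)).sum) 0 (pos - 1)]
      rw [PySem.List.length_pyRange_one, zero_add]
      have hlen : (pos + 1 - 1).toNat = pos.toNat := by omega
      rw [hlen, sum_list_range]
      refine Finset.sum_congr rfl (fun k _ => ?_)
      rw [row_full num (pos - 1 + (k : Int)) (pos * 2) (by omega) hd]
      rw [PySem.List.len_eq, PySem.List.pyRange_zero_nat, List.map_map, sum_list_range]
      simp [Function.comp_def]
    -- B as a single guarded sum
    have hB : addsum_alt pos num = ∑ j ∈ Finset.range num.length,
        (if pos - 1 ≤ PySem.Int.mod (j : Int) (2 * pos)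
            ∧ PySem.Int.mod (j : Int) (2 * pos) ≤ 2 * pos - 2
         then PySem.List.pyGetD num (j : Int) 0 else 0) := by
      have hB0 : addsum_alt pos num = (PySem.List.enumerate num).foldl
          (fun total iv =>
            if pos - 1 ≤ PySem.Int.mod iv.1 (2 * pos) ∧ PySem.Int.mod iv.1 (2 * pos) ≤ 2 * pos - 2
            then total + iv.2 else total) 0 := by
        simp only [addsum_alt]
        rw [if_neg hp0]
      rw [hB0, PySem.List.enumerate_eq_map_pyRange num 0,
        foldl_if_add _ (fun iv : Int × Int =>
          pos - 1 ≤ PySem.Int.mod iv.1 (2 * pos) ∧ PySem.Int.mod iv.1 (2 * pos) ≤ 2 * pos - 2)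
          (fun iv => iv.2) 0,
        zero_add, List.map_map, PySem.List.len_eq, PySem.List.pyRange_zero_nat, List.map_map,
        sum_list_range]
      simp [Function.comp_def]
    rw [hA, hB, Finset.sum_comm]
    refine Finset.sum_congr rfl (fun j _ => ?_)
    exact key_column pos (j : Int) (PySem.List.pyGetD num (j : Int) 0) hp (by omega)
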